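-- pv_equiv track=rewrite | github.com/azf99/pan-aadhar-ocr | pan.py | check_names
-- ===== SOURCE A (Python) =====
-- def check_names(arr):
--     '''
--     From the array of text, searches for the person names using specific pattern
--
--     TODO: Improvements
--     '''
--
--     names = []
--     for i in arr:
--         flag = False
--         for j in i:
--             if not ((j >= "A" and j <= "Z") or j == " "):
--                 flag = True
--                 break
--         if not flag and i != "":
--             names.append(i)
--     return (names)
-- ===== SOURCE B (Python) =====
-- import re
--
-- _NAME = re.compile(r'[A-Z ]+')
--
-- def check_names(arr):
--     return [s for s in arr if _NAME.fullmatch(s)]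
-- ===== Notes on version B (the rewrite author's own statement) =====
-- stated objective: idiomatic
-- what changed: Replaced the explicit per-character loop with break flag and accumulator append by a list comprehension filtering on re.fullmatch('[A-Z ]+', s), delegating the scan to the regex engine.
import Mathlib
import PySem

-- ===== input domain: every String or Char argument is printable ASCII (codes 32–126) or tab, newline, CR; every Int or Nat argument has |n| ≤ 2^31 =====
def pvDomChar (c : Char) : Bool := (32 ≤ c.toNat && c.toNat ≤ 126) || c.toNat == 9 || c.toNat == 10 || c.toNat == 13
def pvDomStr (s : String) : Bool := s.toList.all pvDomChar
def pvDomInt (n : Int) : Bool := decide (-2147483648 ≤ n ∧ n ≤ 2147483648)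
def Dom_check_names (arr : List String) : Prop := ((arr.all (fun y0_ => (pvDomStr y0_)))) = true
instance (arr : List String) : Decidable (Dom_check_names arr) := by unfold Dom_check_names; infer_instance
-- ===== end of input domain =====

-- B replaces A's explicit flag-and-break character loop by a regex-fullmatch filter; same values, idiomatic.

-- ===== PORT A =====
-- inner 'for j in i: if not (...) : flag = True; break' — returns the final flag
def checkFlag (cs : List Char) : Bool :=
  match cs with
  | [] => false
  | j :: rest => if !((('A' ≤ j) && (j ≤ 'Z')) || (j == ' ')) then true else checkFlag rest

def check_names (arr : List String) : List String :=
  arr.foldl (fun names i =>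
    let flag := checkFlag i.toList
    if !flag && i ≠ "" then names ++ [i] else names) []

-- ===== PORT B =====
-- re.fullmatch('[A-Z ]+', s): non-empty and every char in the class [A-Z ]
def fullmatchNameClass (s : String) : Bool :=
  !s.toList.isEmpty && s.toList.all (fun c => (('A' ≤ c) && (c ≤ 'Z')) || (c == ' '))

def check_names_alt (arr : List String) : List String :=
  arr.filter fullmatchNameClass

-- ===== PRECONDITION & SPEC =====
def Spec_check_names (arr : List String) (out : List String) : Prop := out = check_names_alt arr
instance (arr : List String) (out : List String) : Decidable (Spec_check_names arr out) := by unfold Spec_check_names; infer_instance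

-- ===== CLAIM (what is proved, stated in full; the proofs are below) =====
def Claim_equal_check_names : Prop := ∀ (arr : List String), Dom_check_names arr → Spec_check_names arr (check_names arr)

-- ===== LEMMAS AND PROOFS =====
lemma checkFlag_eq (cs : List Char) :
    checkFlag cs = !cs.all (fun c => (('A' ≤ c) && (c ≤ 'Z')) || (c == ' ')) := by
  induction cs with
  | nil => simp [checkFlag]
  | cons j rest ih =>
    simp only [checkFlag, List.all_cons]
    by_cases h : ((('A' ≤ j) && (j ≤ 'Z')) || (j == ' ')) = true <;> simp [h, ih]

lemma cond_eq (i : String) :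
    (!checkFlag i.toList && i ≠ "") = fullmatchNameClass i := by
  rw [checkFlag_eq, fullmatchNameClass]
  have hne : i.toList.isEmpty = decide (i = "") := by
    have h : (i = "") ↔ i.toList = [] :=
      ⟨fun h => by simp [h], fun h => String.toList_inj.mp (by simp [h])⟩
    simp only [h]
    cases i.toList <;> simp
  rw [hne]
  by_cases h : i = "" <;> simp [h, Bool.and_comm]

lemma foldl_eq (arr acc : List String) :
    arr.foldl (fun names i =>
      let flag := checkFlag i.toList
      if !flag && i ≠ "" then names ++ [i] else names) acc
    = acc ++ arr.filter fullmatchNameClass := by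
  induction arr generalizing acc with
  | nil => simp
  | cons i rest ih =>
    rw [List.foldl_cons, List.filter_cons, ← cond_eq i]
    cases h : (!checkFlag i.toList && decide (i ≠ ""))
    · simp only [h, Bool.false_eq_true, if_false, ite_false, ih]
    · simp only [h, if_true, ite_true, ih, List.append_assoc, List.singleton_append]

-- ===== VERDICT (by name: the statement is the Claim_ definition above) =====
theorem check_names_spec : Claim_equal_check_names := by
  intro arr _
  unfold Spec_check_names check_names check_names_alt
  simpa using foldl_eq arr []
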